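-- pv_equiv track=rewrite | github.com/prography-6th-study/algorithm-code | yeji/4-방의개수.py | solution
-- ===== SOURCE A (Python) =====
-- from collections import deque
--
-- dx = [-1, -1, 0, 1, 1, 1, 0, -1]
--
-- dy = [0, 1, 1, 1, 0, -1, -1, -1]
--
-- def solution(arrows):
--     cnt, dir, q = {}, {}, deque()
--     cnt[(0, 0)] = 0
--     q.append([0, 0])
--     x, y, ans = 0, 0, 0
--
--     for i in arrows:
--         for j in range(2):
--             nx = x + dx[i]
--             ny = y + dy[i]
--             cnt[(nx, ny)] = 0
--             dir[(x, y, nx, ny)] = 0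
--             dir[(nx, ny, x, y)] = 0
--             q.append([nx, ny])
--             x, y = nx, ny
--
--     x, y = q.popleft()
--     cnt[(x, y)] = 1
--     while q:
--         nx, ny = q.popleft()
--
--         if cnt[(nx, ny)] == 1:
--             if dir[(x, y, nx, ny)] == 0:
--                 ans += 1
--                 dir[(x, y, nx, ny)] = 1
--                 dir[(nx, ny, x, y)] = 1
--         else:
--             cnt[(nx, ny)] = 1
--             dir[(x, y, nx, ny)] = 1
--             dir[(nx, ny, x, y)] = 1
--
--         x, y = nx, ny
--
--     return ans
-- ===== SOURCE B (Python) =====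
-- dx = [-1, -1, 0, 1, 1, 1, 0, -1]
-- dy = [0, 1, 1, 1, 0, -1, -1, -1]
--
-- def solution(arrows):
--     x, y = 0, 0
--     vertices = {(0, 0)}
--     edges = set()
--     for i in arrows:
--         for _ in range(2):
--             nx, ny = x + dx[i], y + dy[i]
--             vertices.add((nx, ny))
--             edges.add(tuple(sorted(((x, y), (nx, ny)))))
--             x, y = nx, ny
--     return len(edges) - len(vertices) + 1
-- ===== Notes on version B (the rewrite author's own statement) =====
-- stated objective: simpler
-- what changed: B drops A's second pass (the deque walk that re-counts back-edges through the cnt/dir dicts) and instead collects the visited vertices and deduplicated undirected edges in the single building pass, returning len(edges) - len(vertices) + 1 by Euler's formula for a connected planar walk.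
import Mathlib
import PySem

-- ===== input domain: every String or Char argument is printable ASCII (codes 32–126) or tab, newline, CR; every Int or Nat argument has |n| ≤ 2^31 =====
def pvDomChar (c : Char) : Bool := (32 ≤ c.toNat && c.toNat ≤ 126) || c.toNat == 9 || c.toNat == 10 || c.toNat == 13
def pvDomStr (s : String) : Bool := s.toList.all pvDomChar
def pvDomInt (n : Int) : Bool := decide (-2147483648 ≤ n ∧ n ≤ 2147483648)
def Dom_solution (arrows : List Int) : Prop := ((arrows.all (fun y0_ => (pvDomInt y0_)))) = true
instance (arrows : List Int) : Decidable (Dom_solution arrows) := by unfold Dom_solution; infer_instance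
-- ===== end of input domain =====

-- B replaces A's second walk pass (the back-edge count over the cnt/dir dicts) by Euler's
-- formula |edges| - |vertices| + 1 over two sets built in the single building pass (objective: simpler).

-- ===== PORT A =====
-- dx, dy: module-level direction tables
def pvDx : List Int := [-1, -1, 0, 1, 1, 1, 0, -1]
def pvDy : List Int := [0, 1, 1, 1, 0, -1, -1, -1]

-- state of the first loop: (cnt, dir, q, x, y)
abbrev StBuild := PySem.Dict (Int × Int) Int × PySem.Dict (Int × Int × Int × Int) Int × List (Int × Int) × Int × Int

-- one execution of the inner body (`for j in range(2)` runs it twice; j is unused).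
-- dx[i] is ported as pyGetD with default 0: Pre_solution keeps i in [-8, 8), exactly where
-- Python's dx[i] does not raise IndexError, and there pyGetD equals dx[i].
def buildStep (st : StBuild) (i : Int) : StBuild :=
  match st with
  | (cnt, dir, q, x, y) =>
    let nx := x + PySem.List.pyGetD pvDx i 0
    let ny := y + PySem.List.pyGetD pvDy i 0
    (cnt.insert (nx, ny) 0,
     (dir.insert (x, y, nx, ny) 0).insert (nx, ny, x, y) 0,
     q ++ [(nx, ny)], nx, ny)

-- state of the while loop: (x, y, cnt, dir, ans)
abbrev StWalk := Int × Int × PySem.Dict (Int × Int) Int × PySem.Dict (Int × Int × Int × Int) Int × Int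

-- body of `while q:`; cnt[(nx,ny)] and dir[(x,y,nx,ny)] are ported as getD: both keys were
-- inserted by the first loop (every q point and every consecutive pair), so the default is never read.
def walkStep (st : StWalk) (p : Int × Int) : StWalk :=
  match st, p with
  | (x, y, cnt, dir, ans), (nx, ny) =>
    if cnt.getD (nx, ny) 0 = 1 then
      if dir.getD (x, y, nx, ny) 0 = 0 then
        (nx, ny, cnt, (dir.insert (x, y, nx, ny) 1).insert (nx, ny, x, y) 1, ans + 1)
      else (nx, ny, cnt, dir, ans)
    else
      (nx, ny, cnt.insert (nx, ny) 1,
       (dir.insert (x, y, nx, ny) 1).insert (nx, ny, x, y) 1, ans)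

def solution (arrows : List Int) : Int :=
  let init : StBuild :=
    ((PySem.Dict.empty).insert ((0 : Int), (0 : Int)) 0, PySem.Dict.empty,
     [((0 : Int), (0 : Int))], 0, 0)
  match arrows.foldl (fun st i => buildStep (buildStep st i) i) init with
  | (cnt, dir, q, _, _) =>
    match q with
    | [] => 0   -- unreachable: q always contains the initial (0, 0)
    | (x, y) :: rest =>
      let fin := rest.foldl walkStep (x, y, cnt.insert (x, y) 1, dir, 0)
      fin.2.2.2.2

-- ===== PORT B =====
-- tuple(sorted(((x,y),(nx,ny)))): the undirected edge as a lexicographically ordered pair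
def edgeKey (a b : Int × Int) : (Int × Int) × (Int × Int) :=
  if a.1 < b.1 ∨ (a.1 = b.1 ∧ a.2 ≤ b.2) then (a, b) else (b, a)

-- state: (x, y, vertices, edges)
abbrev StAlt := Int × Int × PySem.Set (Int × Int) × PySem.Set ((Int × Int) × (Int × Int))

-- one execution of the inner body of Source B (run twice per arrow)
def altStep (st : StAlt) (i : Int) : StAlt :=
  match st with
  | (x, y, v, e) =>
    let nx := x + PySem.List.pyGetD pvDx i 0
    let ny := y + PySem.List.pyGetD pvDy i 0
    (nx, ny, PySem.Set.add v (nx, ny), PySem.Set.add e (edgeKey (x, y) (nx, ny)))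

def solution_alt (arrows : List Int) : Int :=
  let fin := arrows.foldl (fun st i => altStep (altStep st i) i)
    ((0 : Int), (0 : Int), PySem.Set.ofList [((0 : Int), (0 : Int))],
     (PySem.Set.empty : PySem.Set ((Int × Int) × (Int × Int))))
  (PySem.Set.len fin.2.2.2 : Int) - PySem.Set.len fin.2.2.1 + 1

-- ===== PRECONDITION & SPEC =====
-- Pre_: exactly the arrow values for which Python's dx[i] returns (negative values wrap);
-- outside it both Pythons raise IndexError.
def Pre_solution (arrows : List Int) : Prop := ∀ i ∈ arrows, -8 ≤ i ∧ i < 8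
instance (arrows : List Int) : Decidable (Pre_solution arrows) := by unfold Pre_solution; infer_instance
def pvWitness_solution : List Int := [0, 2, 4, 6, 0]

def Spec_solution (arrows : List Int) (out : Int) : Prop := out = solution_alt arrows
instance (arrows : List Int) (out : Int) : Decidable (Spec_solution arrows out) := by unfold Spec_solution; infer_instance

-- ===== CLAIM (what is proved, stated in full; the proofs are below) =====
def Claim_equal_solution : Prop := ∀ (arrows : List Int), Dom_solution arrows → Pre_solution arrows → Spec_solution arrows (solution arrows)

-- ===== LEMMAS AND PROOFS =====

-- the step vector of arrow i
def delta (i : Int) : Int × Int := (PySem.List.pyGetD pvDx i 0, PySem.List.pyGetD pvDy i 0)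

-- the doubled arrow list (each arrow moves twice)
def dsOf (arrows : List Int) : List Int := arrows.flatMap (fun i => [i, i])

-- the points visited after p along the moves ds (excluding p itself)
def ptsFrom : Int × Int → List Int → List (Int × Int)
  | _, [] => []
  | p, i :: t =>
    let q := (p.1 + (delta i).1, p.2 + (delta i).2)
    q :: ptsFrom q t

-- the coupling invariant between A's walk state and B's accumulating state
def WRel (sa : StWalk) (sb : StAlt) : Prop :=
  sa.1 = sb.1 ∧ sa.2.1 = sb.2.1 ∧
  (sa.1, sa.2.1) ∈ sb.2.2.1 ∧
  (∀ p : Int × Int, sa.2.2.1.getD p 0 = if p ∈ sb.2.2.1 then 1 else 0) ∧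
  (∀ a b c d : Int, sa.2.2.2.1.getD (a, b, c, d) 0 = if edgeKey (a, b) (c, d) ∈ sb.2.2.2 then 1 else 0) ∧
  (∀ e ∈ sb.2.2.2, e.1 ∈ sb.2.2.1 ∧ e.2 ∈ sb.2.2.1) ∧
  sa.2.2.2.2 = (sb.2.2.2.length : Int) + 1 - (sb.2.2.1.length : Int)

lemma edgeKey_fst_snd (a b : Int × Int) :
    (edgeKey a b).1 = a ∧ (edgeKey a b).2 = b ∨ (edgeKey a b).1 = b ∧ (edgeKey a b).2 = a := by
  unfold edgeKey; split_ifs <;> simp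

lemma edgeKey_comm (a b : Int × Int) : edgeKey a b = edgeKey b a := by
  rcases a with ⟨a1, a2⟩; rcases b with ⟨b1, b2⟩
  unfold edgeKey
  split_ifs <;> simp_all [Prod.ext_iff] <;> omega

lemma edgeKey_eq_iff (a b c d : Int × Int) :
    edgeKey a b = edgeKey c d ↔ (a = c ∧ b = d) ∨ (a = d ∧ b = c) := by
  constructor
  · intro h
    rcases edgeKey_fst_snd a b with ⟨h1, h2⟩ | ⟨h1, h2⟩ <;>
      rcases edgeKey_fst_snd c d with ⟨h3, h4⟩ | ⟨h3, h4⟩ <;>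
      rw [h] at h1 h2 <;>
      [left; right; right; left] <;>
      first
        | exact ⟨h1.symm.trans h3, h2.symm.trans h4⟩
        | exact ⟨h2.symm.trans h4, h1.symm.trans h3⟩
  · rintro (⟨rfl, rfl⟩ | ⟨rfl, rfl⟩)
    · rfl
    · exact edgeKey_comm a b

-- the dir-dict update of one move matches the edge-set update, for every 4-tuple key
lemma dir_update (dir : PySem.Dict (Int × Int × Int × Int) Int) (E : PySem.Set ((Int × Int) × (Int × Int)))
    (x y nx ny : Int)
    (hd : ∀ a b c d : Int, dir.getD (a, b, c, d) 0 = if edgeKey (a, b) (c, d) ∈ E then 1 else 0) :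
    ∀ a b c d : Int, ((dir.insert (x, y, nx, ny) 1).insert (nx, ny, x, y) 1).getD (a, b, c, d) 0
      = if edgeKey (a, b) (c, d) ∈ PySem.Set.add E (edgeKey (x, y) (nx, ny)) then 1 else 0 := by
  intro a b c d
  simp only [PySem.Dict.getD_insert, hd, PySem.Set.mem_add, edgeKey_eq_iff, Prod.mk.injEq]
  split_ifs <;> tauto

lemma step_rel (sa : StWalk) (sb : StAlt) (i : Int) (h : WRel sa sb) :
    WRel (walkStep sa (sa.1 + (delta i).1, sa.2.1 + (delta i).2)) (altStep sb i) := by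
  rcases sa with ⟨x, y, cnt, dir, ans⟩
  rcases sb with ⟨x', y', V, E⟩
  obtain ⟨hx, hy, hpos, hc, hd, hend, hans⟩ := h
  simp only at hx hy hpos hc hd hend hans
  subst hx hy
  set nx := x + (delta i).1 with hnx
  set ny := y + (delta i).2 with hny
  have haS : altStep (x, y, V, E) i
      = (nx, ny, PySem.Set.add V (nx, ny), PySem.Set.add E (edgeKey (x, y) (nx, ny))) := by
    simp only [altStep, delta, hnx, hny]
  rw [haS]
  by_cases hv : (nx, ny) ∈ V
  · -- revisited vertex: V unchanged
    rw [PySem.Set.add_of_mem hv]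
    have hcnt1 : cnt.getD (nx, ny) 0 = 1 := by rw [hc]; simp [hv]
    by_cases he : edgeKey (x, y) (nx, ny) ∈ E
    · -- edge already traversed: nothing changes
      rw [PySem.Set.add_of_mem he]
      have hdir1 : dir.getD (x, y, nx, ny) 0 = 1 := by rw [hd]; simp [he]
      simp only [walkStep, hcnt1, hdir1, if_true]
      dsimp only [WRel]
      exact ⟨rfl, rfl, hv, hc, hd, hend, hans⟩
    · -- new edge closing a room: ans increases, edge set grows
      rw [PySem.Set.add_of_not_mem he]
      have hdir0 : dir.getD (x, y, nx, ny) 0 = 0 := by rw [hd]; simp [he]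
      simp only [walkStep, hcnt1, hdir0, if_true]
      dsimp only [WRel]
      refine ⟨rfl, rfl, hv, hc, ?_, ?_, ?_⟩
      · have := dir_update dir E x y nx ny hd
        rwa [PySem.Set.add_of_not_mem he] at this
      · intro e hee
        rcases List.mem_append.mp hee with hE | hk
        · exact hend e hE
        · have hk' : e = edgeKey (x, y) (nx, ny) := by simpa using hk
          subst hk'
          rcases edgeKey_fst_snd (x, y) (nx, ny) with ⟨e1, e2⟩ | ⟨e1, e2⟩ <;>
            rw [e1, e2] <;> exact ⟨by assumption, by assumption⟩
      · simp only [List.length_append, List.length_singleton]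
        push_cast
        omega
  · -- new vertex: it is added, its first edge is added, ans unchanged
    have hke : edgeKey (x, y) (nx, ny) ∉ E := by
      intro he
      rcases hend _ he with ⟨p1, p2⟩
      rcases edgeKey_fst_snd (x, y) (nx, ny) with ⟨e1, e2⟩ | ⟨e1, e2⟩
      · rw [e2] at p2; exact hv p2
      · rw [e1] at p1; exact hv p1
    rw [PySem.Set.add_of_not_mem hv, PySem.Set.add_of_not_mem hke]
    have hcnt0 : cnt.getD (nx, ny) 0 = 0 := by rw [hc]; simp [hv]
    simp only [walkStep, hcnt0, if_neg (by norm_num : ¬ ((0 : Int) = 1))]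
    dsimp only [WRel]
    refine ⟨rfl, rfl, ?_, ?_, ?_, ?_, ?_⟩
    · simp
    · intro p
      simp only [PySem.Dict.getD_insert, hc, List.mem_append, List.mem_singleton]
      split_ifs <;> tauto
    · have := dir_update dir E x y nx ny hd
      rwa [PySem.Set.add_of_not_mem hke] at this
    · intro e hee
      rcases List.mem_append.mp hee with hE | hk
      · rcases hend e hE with ⟨p1, p2⟩
        exact ⟨List.mem_append_left _ p1, List.mem_append_left _ p2⟩
      · have hk' : e = edgeKey (x, y) (nx, ny) := by simpa using hk
        subst hk'
        rcases edgeKey_fst_snd (x, y) (nx, ny) with ⟨e1, e2⟩ | ⟨e1, e2⟩ <;> rw [e1, e2]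
        · exact ⟨List.mem_append_left _ hpos, List.mem_append_right _ (by simp)⟩
        · exact ⟨List.mem_append_right _ (by simp), List.mem_append_left _ hpos⟩
    · simp only [List.length_append, List.length_singleton]
      push_cast
      omega

lemma walkStep_x (s : StWalk) (p : Int × Int) : (walkStep s p).1 = p.1 := by
  rcases s with ⟨x, y, cnt, dir, ans⟩; rcases p with ⟨nx, ny⟩
  simp only [walkStep]
  split_ifs <;> rfl

lemma walkStep_y (s : StWalk) (p : Int × Int) : (walkStep s p).2.1 = p.2 := by
  rcases s with ⟨x, y, cnt, dir, ans⟩; rcases p with ⟨nx, ny⟩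
  simp only [walkStep]
  split_ifs <;> rfl

lemma walk_rel (l : List Int) (sa : StWalk) (sb : StAlt) (h : WRel sa sb) :
    WRel (List.foldl walkStep sa (ptsFrom (sa.1, sa.2.1) (dsOf l)))
        (List.foldl (fun st i => altStep (altStep st i) i) sb l) := by
  induction l generalizing sa sb with
  | nil => simpa [dsOf, ptsFrom] using h
  | cons i t ih =>
    have hds : dsOf (i :: t) = i :: i :: dsOf t := by simp [dsOf]
    rw [hds]
    simp only [ptsFrom, List.foldl_cons]
    have h1 := step_rel sa sb i h
    have h2 := step_rel _ _ i h1
    have h3 := ih _ _ h2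
    simp only [walkStep_x, walkStep_y] at h3
    exact h3

lemma build_spec (l : List Int) (s : StBuild)
    (hc : ∀ p : Int × Int, s.1.getD p 0 = 0)
    (hd : ∀ k : Int × Int × Int × Int, s.2.1.getD k 0 = 0) :
    (∀ p : Int × Int, (List.foldl (fun st i => buildStep (buildStep st i) i) s l).1.getD p 0 = 0) ∧
    (∀ k : Int × Int × Int × Int, (List.foldl (fun st i => buildStep (buildStep st i) i) s l).2.1.getD k 0 = 0) ∧
    (List.foldl (fun st i => buildStep (buildStep st i) i) s l).2.2.1
      = s.2.2.1 ++ ptsFrom (s.2.2.2.1, s.2.2.2.2) (dsOf l) := by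
  induction l generalizing s with
  | nil =>
    refine ⟨hc, hd, ?_⟩
    simp [dsOf, ptsFrom]
  | cons i t ih =>
    rcases s with ⟨cnt, dir, q, x, y⟩
    simp only at hc hd
    have hb : buildStep (buildStep (cnt, dir, q, x, y) i) i
        = ((cnt.insert (x + (delta i).1, y + (delta i).2) 0).insert
             (x + (delta i).1 + (delta i).1, y + (delta i).2 + (delta i).2) 0,
           ((((dir.insert (x, y, x + (delta i).1, y + (delta i).2) 0).insert
                (x + (delta i).1, y + (delta i).2, x, y) 0).insert
               (x + (delta i).1, y + (delta i).2, x + (delta i).1 + (delta i).1,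
                y + (delta i).2 + (delta i).2) 0).insert
              (x + (delta i).1 + (delta i).1, y + (delta i).2 + (delta i).2,
               x + (delta i).1, y + (delta i).2) 0),
           q ++ [(x + (delta i).1, y + (delta i).2)]
             ++ [(x + (delta i).1 + (delta i).1, y + (delta i).2 + (delta i).2)],
           x + (delta i).1 + (delta i).1, y + (delta i).2 + (delta i).2) := by
      simp only [buildStep, delta]
    have hc' : ∀ p : Int × Int,
        ((cnt.insert (x + (delta i).1, y + (delta i).2) 0).insert
           (x + (delta i).1 + (delta i).1, y + (delta i).2 + (delta i).2) 0).getD p 0 = 0 := by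
      intro p
      simp only [PySem.Dict.getD_insert]
      split_ifs <;> simp [hc]
    have hd' : ∀ k : Int × Int × Int × Int,
        (((((dir.insert (x, y, x + (delta i).1, y + (delta i).2) 0).insert
                (x + (delta i).1, y + (delta i).2, x, y) 0).insert
               (x + (delta i).1, y + (delta i).2, x + (delta i).1 + (delta i).1,
                y + (delta i).2 + (delta i).2) 0).insert
              (x + (delta i).1 + (delta i).1, y + (delta i).2 + (delta i).2,
               x + (delta i).1, y + (delta i).2) 0)).getD k 0 = 0 := by
      intro k
      simp only [PySem.Dict.getD_insert]
      split_ifs <;> simp [hd]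
    have h3 := ih (buildStep (buildStep (cnt, dir, q, x, y) i) i)
      (by rw [hb]; exact hc') (by rw [hb]; exact hd')
    simp only [List.foldl_cons]
    refine ⟨h3.1, h3.2.1, ?_⟩
    rw [h3.2.2, hb]
    simp [dsOf, ptsFrom, List.append_assoc]

-- ===== VERDICT (by name: the statement is the Claim_ definition above) =====
theorem solution_spec : Claim_equal_solution := by
  unfold Claim_equal_solution
  intro arrows _ _
  unfold Spec_solution
  have hc0 : ∀ p : Int × Int,
      ((PySem.Dict.empty : PySem.Dict (Int × Int) Int).insert ((0 : Int), (0 : Int)) 0).getD p 0 = 0 := by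
    intro p
    simp only [PySem.Dict.getD_insert]
    split_ifs <;> simp [PySem.Dict.getD_empty]
  have hd0 : ∀ k : Int × Int × Int × Int,
      (PySem.Dict.empty : PySem.Dict (Int × Int × Int × Int) Int).getD k 0 = 0 := by
    intro k; simp [PySem.Dict.getD_empty]
  obtain ⟨hcz, hdz, hq⟩ := build_spec arrows
    ((PySem.Dict.empty).insert ((0 : Int), (0 : Int)) 0, PySem.Dict.empty,
     [((0 : Int), (0 : Int))], 0, 0) hc0 hd0
  rcases hF : List.foldl (fun st i => buildStep (buildStep st i) i)
      ((PySem.Dict.empty).insert ((0 : Int), (0 : Int)) 0, PySem.Dict.empty,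
       [((0 : Int), (0 : Int))], 0, 0) arrows with ⟨cnt, dir, q, xx, yy⟩
  rw [hF] at hq hcz hdz
  simp only [List.singleton_append] at hq hcz hdz
  have hsol : solution arrows
      = (List.foldl walkStep
          ((0 : Int), (0 : Int), cnt.insert ((0 : Int), (0 : Int)) 1, dir, (0 : Int))
          (ptsFrom ((0 : Int), (0 : Int)) (dsOf arrows))).2.2.2.2 := by
    simp only [solution]
    rw [hF, hq]
  have h0 : WRel ((0 : Int), (0 : Int), cnt.insert ((0 : Int), (0 : Int)) 1, dir, (0 : Int))
      ((0 : Int), (0 : Int), PySem.Set.ofList [((0 : Int), (0 : Int))],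
       (PySem.Set.empty : PySem.Set ((Int × Int) × (Int × Int)))) := by
    refine ⟨rfl, rfl, by simp [PySem.Set.ofList, PySem.Set.add, PySem.Set.empty], ?_, ?_, ?_, ?_⟩
    · intro p
      simp only [PySem.Dict.getD_insert, hcz]
      split_ifs with h1 h2 h2 <;> simp_all [PySem.Set.ofList, PySem.Set.add, PySem.Set.empty]
    · intro a b c d
      simp [hdz, PySem.Set.empty]
    · intro e he
      simp [PySem.Set.empty] at he
    · simp [PySem.Set.ofList, PySem.Set.add, PySem.Set.empty]
  have hmain := walk_rel arrows _ _ h0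
  obtain ⟨-, -, -, -, -, -, hans⟩ := hmain
  simp only at hans
  rw [hsol]
  unfold solution_alt
  simp only [PySem.Set.len]
  rw [hans]
  ring
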